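-- pv_equiv track=rewrite | github.com/raphey/advent-of-code-2021 | 20.py | get_down_match_guide
-- ===== SOURCE A (Python) =====
-- def get_down_match_guide(tiles):
--     guide = []
--     for i, t in enumerate(tiles):
--         matches = []
--         for j, u in enumerate(tiles):
--             if t[0] == u[0]:
--                 continue
--             if t[1][-1] == u[1][0]:
--                 matches.append(j)
--         guide.append(matches)
--     return guide
-- ===== SOURCE B (Python) =====
-- def get_down_match_guide(tiles):
--     index = {}
--     for j, (tid, rows) in enumerate(tiles):
--         index.setdefault(rows[0], []).append((j, tid))
--     guide = []
--     for tid, rows in tiles: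
--         guide.append([j for j, uid in index.get(rows[-1], []) if uid != tid])
--     return guide
-- ===== Notes on version B (the rewrite author's own statement) =====
-- stated objective: alternative
-- what changed: Replaced the nested all-pairs scan by a single pass that hash-indexes tiles by their top row and then does one dict lookup per tile (filtering out same-id entries); intended as faster (O(n + total matches) vs O(n^2) comparisons), measured faster on most but not all timing inputs.
-- outside the precondition, e.g. on get_down_match_guide([(1, [])]): A returns [[]], B raises IndexError
import Mathlib
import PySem

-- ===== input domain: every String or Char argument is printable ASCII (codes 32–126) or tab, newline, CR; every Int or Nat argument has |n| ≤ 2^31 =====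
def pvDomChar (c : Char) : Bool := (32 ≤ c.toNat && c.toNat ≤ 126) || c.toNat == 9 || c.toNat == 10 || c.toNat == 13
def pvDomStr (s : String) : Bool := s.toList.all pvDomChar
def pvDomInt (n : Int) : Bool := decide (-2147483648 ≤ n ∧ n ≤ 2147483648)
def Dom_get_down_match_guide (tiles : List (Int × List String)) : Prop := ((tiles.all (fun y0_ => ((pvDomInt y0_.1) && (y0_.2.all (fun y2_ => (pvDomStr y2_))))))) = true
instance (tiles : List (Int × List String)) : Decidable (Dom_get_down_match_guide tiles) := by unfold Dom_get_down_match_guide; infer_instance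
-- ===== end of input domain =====

-- B replaces A's nested all-pairs scan by a dict indexing top rows once, then one lookup per tile (alternative algorithm, O(n + total matches) comparisons).

-- ===== PORT A =====
def get_down_match_guide (tiles : List (Int × List String)) : List (List Int) :=
  (PySem.List.enumerate tiles 0).foldl (fun guide it =>
    let ms_ := (PySem.List.enumerate tiles 0).foldl (fun ms ju =>
      if it.2.1 == ju.2.1 then ms
      else if PySem.List.pyGet? it.2.2 (-1) == PySem.List.pyGet? ju.2.2 0 then ms ++ [ju.1]
      else ms) ([] : List Int)
    guide ++ [ms_]) []

-- ===== PORT B =====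
-- index.setdefault(rows[0], []).append((j, tid))  ≡  insert at key rows[0] the extended list
-- (rows[0] / rows[-1] are ported as pyGet?, so the dict is keyed by Option String; under Pre_ all keys are `some`)
def pvIndex (tiles : List (Int × List String)) : PySem.Dict (Option String) (List (Int × Int)) :=
  (PySem.List.enumerate tiles 0).foldl (fun d jt =>
    d.insert (PySem.List.pyGet? jt.2.2 0) ((d.getD (PySem.List.pyGet? jt.2.2 0) []) ++ [(jt.1, jt.2.1)]))
    PySem.Dict.empty

def get_down_match_guide_alt (tiles : List (Int × List String)) : List (List Int) :=
  let index := pvIndex tiles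
  tiles.map (fun t =>
    (((index.getD (PySem.List.pyGet? t.2 (-1)) []).filter (fun ju => ju.2 != t.1)).map (·.1)))

-- ===== PRECONDITION & SPEC =====
-- Pre_ excludes tile lists containing a tile with an empty row list: Python B raises IndexError on
-- all of them, and Python A also raises IndexError there unless every id coincides (see claim cites).
def Pre_get_down_match_guide (tiles : List (Int × List String)) : Prop :=
  ∀ t ∈ tiles, t.2 ≠ []
instance (tiles : List (Int × List String)) : Decidable (Pre_get_down_match_guide tiles) := by unfold Pre_get_down_match_guide; infer_instance

def pvWitness_get_down_match_guide : (List (Int × List String)) :=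
  [(1, ["ab", "cd"]), (2, ["cd", "xy"])]

def Spec_get_down_match_guide (tiles : List (Int × List String)) (out : List (List Int)) : Prop := out = get_down_match_guide_alt tiles
instance (tiles : List (Int × List String)) (out : List (List Int)) : Decidable (Spec_get_down_match_guide tiles out) := by unfold Spec_get_down_match_guide; infer_instance

-- ===== CLAIM (what is proved, stated in full; the proofs are below) =====
def Claim_equal_get_down_match_guide : Prop := ∀ (tiles : List (Int × List String)), Dom_get_down_match_guide tiles → Pre_get_down_match_guide tiles → Spec_get_down_match_guide tiles (get_down_match_guide tiles)

-- ===== LEMMAS AND PROOFS =====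

-- what pvIndex stores at a key: the enumerated tiles whose top row is that key, in order
theorem pvIndex_getD (l : List (Int × List String)) (s : Int)
    (d : PySem.Dict (Option String) (List (Int × Int))) (k : Option String) :
    ((PySem.List.enumerate l s).foldl (fun d jt =>
      d.insert (PySem.List.pyGet? jt.2.2 0) ((d.getD (PySem.List.pyGet? jt.2.2 0) []) ++ [(jt.1, jt.2.1)])) d).getD k []
    = d.getD k [] ++ ((PySem.List.enumerate l s).filter
        (fun ju => PySem.List.pyGet? ju.2.2 0 == k)).map (fun ju => (ju.1, ju.2.1)) := by
  induction l generalizing s d with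
  | nil => simp [PySem.List.enumerate_nil]
  | cons x xs ih =>
      rw [PySem.List.enumerate_cons]
      simp only [List.foldl_cons, List.filter_cons]
      rw [ih]
      by_cases h : PySem.List.pyGet? x.2 0 = k
      · subst h
        simp [PySem.Dict.getD, PySem.Dict.get?_insert_self]
      · have hb : (PySem.List.pyGet? x.2 0 == k) = false := by
          simp [h]
        simp [hb, PySem.Dict.getD, PySem.Dict.get?_insert_of_ne d _ (Ne.symm h)]

-- the per-tile list identity: A's single filtered scan = B's lookup-then-filter
theorem perTile (l : List (Int × Int × List String)) (t : Int × List String) :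
    (((l.filter (fun ju => PySem.List.pyGet? ju.2.2 0 == PySem.List.pyGet? t.2 (-1))).map
        (fun ju => (ju.1, ju.2.1))).filter (fun ju => ju.2 != t.1)).map (·.1)
    = (l.filter (fun ju =>
        !(t.1 == ju.2.1) && (PySem.List.pyGet? t.2 (-1) == PySem.List.pyGet? ju.2.2 0))).map (·.1) := by
  induction l with
  | nil => rfl
  | cons x xs ih =>
      simp only [List.filter_cons]
      by_cases htop : PySem.List.pyGet? x.2.2 0 = PySem.List.pyGet? t.2 (-1)
      · by_cases hid : x.2.1 = t.1
        · simp [htop, hid, ih]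
        · simp [htop, Ne.symm hid, hid, ih]
      · have h2 : (PySem.List.pyGet? t.2 (-1) == PySem.List.pyGet? x.2.2 0) = false := by
          simp; exact fun h => htop h.symm
        simp [htop, h2, ih]

-- A's inner loop as a filter+map (via the library loop-shape lemma)
theorem innerLoop (tiles : List (Int × List String)) (t : Int × List String) :
    (PySem.List.enumerate tiles 0).foldl (fun ms ju =>
      if t.1 == ju.2.1 then ms
      else if PySem.List.pyGet? t.2 (-1) == PySem.List.pyGet? ju.2.2 0 then ms ++ [ju.1]
      else ms) ([] : List Int)
    = ((PySem.List.enumerate tiles 0).filter (fun ju =>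
        !(t.1 == ju.2.1) && (PySem.List.pyGet? t.2 (-1) == PySem.List.pyGet? ju.2.2 0))).map (·.1) := by
  have hstep : (fun (ms : List Int) (ju : Int × Int × List String) =>
      if t.1 == ju.2.1 then ms
      else if PySem.List.pyGet? t.2 (-1) == PySem.List.pyGet? ju.2.2 0 then ms ++ [ju.1]
      else ms)
    = (fun ms ju =>
      if (!(t.1 == ju.2.1) && (PySem.List.pyGet? t.2 (-1) == PySem.List.pyGet? ju.2.2 0)) = true
      then ms ++ [ju.1] else ms) := by
    funext ms ju
    by_cases h1 : t.1 == ju.2.1 <;> by_cases h2 : PySem.List.pyGet? t.2 (-1) == PySem.List.pyGet? ju.2.2 0 <;>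
      simp [h1, h2]
  rw [hstep, PySem.List.foldl_append_if]
  simp

-- ===== VERDICT (by name: the statement is the Claim_ definition above) =====
theorem get_down_match_guide_spec : Claim_equal_get_down_match_guide := by
  intro tiles _ _
  unfold Spec_get_down_match_guide get_down_match_guide get_down_match_guide_alt pvIndex
  rw [PySem.List.foldl_append_singleton_eq_map
    (f := fun it => (PySem.List.enumerate tiles 0).foldl (fun ms ju =>
      if it.2.1 == ju.2.1 then ms
      else if PySem.List.pyGet? it.2.2 (-1) == PySem.List.pyGet? ju.2.2 0 then ms ++ [ju.1]
      else ms) ([] : List Int))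
    (l := PySem.List.enumerate tiles 0) (acc := ([] : List (List Int)))]
  simp only [List.nil_append]
  have hmapsnd : ∀ (g : (Int × List String) → List Int),
      (PySem.List.enumerate tiles 0).map (fun it => g it.2) = tiles.map g := by
    intro g
    rw [show (fun it : Int × Int × List String => g it.2) = g ∘ (·.2) from rfl,
      ← List.map_map, PySem.List.map_snd_enumerate]
  refine Eq.trans (hmapsnd (fun t => (PySem.List.enumerate tiles 0).foldl (fun ms ju =>
      if t.1 == ju.2.1 then ms
      else if PySem.List.pyGet? t.2 (-1) == PySem.List.pyGet? ju.2.2 0 then ms ++ [ju.1]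
      else ms) ([] : List Int))) ?_
  apply List.map_congr_left
  intro t _
  rw [innerLoop tiles t, pvIndex_getD tiles 0 PySem.Dict.empty,
    show (PySem.Dict.empty.getD (PySem.List.pyGet? t.2 (-1)) ([] : List (Int × Int))) = [] from rfl,
    List.nil_append]
  exact (perTile (PySem.List.enumerate tiles 0) t).symm
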